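-- pv_equiv track=rewrite | github.com/mnluzimu/ape210k | src/wk_convert_to_train.py | _fix_sqrt
-- ===== SOURCE A (Python) =====
-- def _fix_sqrt(string):
--     if "\\sqrt" not in string:
--         return string
--     splits = string.split("\\sqrt")
--     new_string = splits[0]
--     for split in splits[1:]:
--         if len(split) > 0 and split[0] != "{":
--             a = split[0]
--             new_substr = "\\sqrt{" + a + "}" + split[1:]
--         else:
--             new_substr = "\\sqrt" + split
--         new_string += new_substr
--     return new_string
-- ===== SOURCE B (Python) =====
-- def _fix_sqrt(string):
--     # Single left-to-right scan: wrap the character following "\sqrt" in braces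
--     # unless it is "{", absent, or starts another "\sqrt".
--     if "\\sqrt" not in string:
--         return string
--     out = []
--     i = 0
--     n = len(string)
--     while i < n:
--         if string.startswith("\\sqrt", i):
--             i += 5
--             if i < n and string[i] != "{" and not string.startswith("\\sqrt", i):
--                 out.append("\\sqrt{" + string[i] + "}")
--                 i += 1
--             else:
--                 out.append("\\sqrt")
--         else:
--             out.append(string[i])
--             i += 1
--     return "".join(out)
-- ===== Notes on version B (the rewrite author's own statement) =====
-- stated objective: alternative
-- what changed: Replaced A's split("\\sqrt")-then-rejoin loop over the pieces by a single left-to-right scan that, at each occurrence of "\\sqrt", wraps the following character in braces in place (unless it is '{', absent, or starts another "\\sqrt").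
import Mathlib
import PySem

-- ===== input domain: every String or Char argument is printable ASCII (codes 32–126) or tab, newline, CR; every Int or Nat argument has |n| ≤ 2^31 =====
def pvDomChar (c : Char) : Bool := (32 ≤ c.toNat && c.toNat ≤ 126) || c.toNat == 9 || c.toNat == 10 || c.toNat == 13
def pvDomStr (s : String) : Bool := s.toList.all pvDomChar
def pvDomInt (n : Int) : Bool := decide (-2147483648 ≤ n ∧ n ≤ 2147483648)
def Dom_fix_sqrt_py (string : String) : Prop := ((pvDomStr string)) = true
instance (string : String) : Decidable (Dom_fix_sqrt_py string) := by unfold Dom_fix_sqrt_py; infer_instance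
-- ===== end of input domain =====

-- B replaces A's split("\sqrt")-and-rejoin loop by a single left-to-right scan that
-- wraps the character after each "\sqrt" in braces in place (objective: alternative).

-- ===== PORT A =====
-- literal port of A: split on "\sqrt", then rebuild, wrapping each piece's first char
def fix_sqrt_py (string : String) : String :=
  if PySem.Str.isIn "\\sqrt" string = false then string
  else
    let splits := PySem.Chars.splitOn string.toList "\\sqrt".toList
    let new_string := splits.headD []  -- splits[0]; splitOn never returns []
    String.mk ((splits.drop 1).foldl (fun ns split =>
      if 0 < split.length ∧ PySem.List.pyGet? split 0 ≠ some '{' then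
        -- a = split[0] (guard gives split ≠ []), new_substr = "\sqrt{" + a + "}" + split[1:]
        ns ++ ("\\sqrt{".toList ++ split.take 1 ++ "}".toList ++ PySem.List.slice split (some 1) none)
      else
        ns ++ ("\\sqrt".toList ++ split)) new_string)

-- ===== PORT B =====
-- Source B's while-loop over index i, as structural recursion on the remaining suffix;
-- string.startswith("\sqrt", i) is isPrefixOf on the suffix (exact on all inputs)
def pvScan : List Char → List Char
  | [] => []
  | c :: rest =>
    if "\\sqrt".toList.isPrefixOf (c :: rest) then
      let r := (c :: rest).drop 5
      if r ≠ [] ∧ r.head? ≠ some '{' ∧ ¬ "\\sqrt".toList.isPrefixOf r then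
        "\\sqrt{".toList ++ r.take 1 ++ "}".toList ++ pvScan (r.drop 1)
      else
        "\\sqrt".toList ++ pvScan r
    else
      c :: pvScan rest
termination_by l => l.length
decreasing_by all_goals simp

def fix_sqrt_py_alt (string : String) : String :=
  if PySem.Str.isIn "\\sqrt" string = false then string
  else String.mk (pvScan string.toList)

-- ===== PRECONDITION & SPEC =====
def Spec_fix_sqrt_py (string : String) (out : String) : Prop := out = fix_sqrt_py_alt string
instance (string : String) (out : String) : Decidable (Spec_fix_sqrt_py string out) := by unfold Spec_fix_sqrt_py; infer_instance

-- ===== CLAIM (what is proved, stated in full; the proofs are below) =====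
def Claim_equal_fix_sqrt_py : Prop := ∀ (string : String), Dom_fix_sqrt_py string → Spec_fix_sqrt_py string (fix_sqrt_py string)

-- ===== LEMMAS AND PROOFS =====

-- prepend p to the head piece of a split
def pvApplyHead (p : List Char) : List (List Char) → List (List Char)
  | [] => [p]
  | h :: t => (p ++ h) :: t

-- pure (fuel-free) characterisation of splitOn for the separator "\sqrt"
def pvS : List Char → List (List Char)
  | [] => [[]]
  | c :: rest =>
    if "\\sqrt".toList.isPrefixOf (c :: rest) then [] :: pvS ((c :: rest).drop 5)
    else pvApplyHead [c] (pvS rest)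
termination_by l => l.length
decreasing_by all_goals simp

-- A's loop body as a function of the piece alone
def pvF (split : List Char) : List Char :=
  if 0 < split.length ∧ PySem.List.pyGet? split 0 ≠ some '{' then
    "\\sqrt{".toList ++ split.take 1 ++ "}".toList ++ PySem.List.slice split (some 1) none
  else "\\sqrt".toList ++ split

theorem pvApplyHead_cons (p h : List Char) (t : List (List Char)) :
    pvApplyHead p (h :: t) = (p ++ h) :: t := rfl

theorem pvApplyHead_nil_of_ne (l : List (List Char)) (h : l ≠ []) :
    pvApplyHead [] l = l := by
  cases l with
  | nil => exact absurd rfl h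
  | cons a b => simp [pvApplyHead]

theorem pvS_nil : pvS [] = [[]] := by
  rw [pvS]

theorem pvS_prefix (l : List Char) (hp : "\\sqrt".toList.isPrefixOf l) :
    pvS l = [] :: pvS (l.drop 5) := by
  cases l with
  | nil => simp [List.isPrefixOf] at hp
  | cons c rest => rw [pvS, if_pos hp]

theorem pvS_cons (c : Char) (rest : List Char)
    (hp : ¬ "\\sqrt".toList.isPrefixOf (c :: rest)) :
    pvS (c :: rest) = pvApplyHead [c] (pvS rest) := by
  rw [pvS, if_neg hp]

theorem pvS_ne_nil (l : List Char) : pvS l ≠ [] := by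
  cases l with
  | nil => rw [pvS_nil]; simp
  | cons c rest =>
    rw [pvS]
    split
    · simp
    · cases h : pvS rest <;> simp [pvApplyHead]

theorem pvF_nil : pvF [] = "\\sqrt".toList := by simp [pvF]

theorem pvF_cons (d : Char) (h : List Char) (hd : d ≠ '{') :
    pvF (d :: h) = "\\sqrt{".toList ++ [d] ++ "}".toList ++ h := by
  have hs : PySem.List.slice (d :: h) (some 1) none = h := by
    rw [PySem.List.slice_from _ (by norm_num)]
    simp
  simp [pvF, PySem.List.pyGet?, PySem.List.pyIdx?, hd, hs]

theorem pvF_brace (h : List Char) : pvF ('{' :: h) = "\\sqrt".toList ++ '{' :: h := by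
  simp [pvF, PySem.List.pyGet?, PySem.List.pyIdx?]

theorem pv_go_eq (fuel : Nat) (l cur : List Char) (acc : List (List Char))
    (hf : l.length ≤ fuel) :
    PySem.Chars.splitOn.go "\\sqrt".toList fuel l cur acc
      = acc.reverse ++ pvApplyHead cur.reverse (pvS l) := by
  induction fuel generalizing l cur acc with
  | zero =>
    have hl : l = [] := by simpa using List.eq_nil_of_length_eq_zero (Nat.le_zero.mp hf)
    subst hl
    rw [PySem.Chars.splitOn.go.eq_def, pvS_nil]
    simp [pvApplyHead]
  | succ n ih =>
    cases l with
    | nil =>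
      rw [PySem.Chars.splitOn.go.eq_def, pvS_nil]
      simp [pvApplyHead]
    | cons c rest =>
      rw [PySem.Chars.splitOn.go.eq_def]
      by_cases hp : "\\sqrt".toList.isPrefixOf (c :: rest)
      · have hlen : (List.drop ("\\sqrt".toList.length) (c :: rest)).length ≤ n := by
          simp at hf ⊢
          omega
        simp only [hp, if_true]
        rw [ih _ _ _ hlen, pvS_prefix _ hp]
        rw [show ("\\sqrt".toList.length) = 5 from rfl, List.reverse_nil]
        rw [pvApplyHead_nil_of_ne _ (pvS_ne_nil _)]
        simp [pvApplyHead_cons]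
      · simp only [hp, Bool.false_eq_true, if_false]
        rw [ih rest (c :: cur) acc (by simp at hf ⊢; omega), pvS_cons c rest hp]
        cases h : pvS rest with
        | nil => exact absurd h (pvS_ne_nil rest)
        | cons h0 t0 => simp [pvApplyHead_cons]

theorem pv_splitOn_eq (l : List Char) :
    PySem.Chars.splitOn l "\\sqrt".toList = pvS l := by
  unfold PySem.Chars.splitOn
  rw [pv_go_eq _ _ _ _ (by omega)]
  simp [pvApplyHead_nil_of_ne _ (pvS_ne_nil l)]

theorem pvScan_nil : pvScan [] = [] := by rw [pvScan]

theorem pvScan_cons (c : Char) (rest : List Char)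
    (hp : ¬ "\\sqrt".toList.isPrefixOf (c :: rest)) :
    pvScan (c :: rest) = c :: pvScan rest := by
  rw [pvScan]
  exact if_neg hp

theorem pvScan_prefix (c : Char) (rest : List Char)
    (hp : "\\sqrt".toList.isPrefixOf (c :: rest)) :
    pvScan (c :: rest) =
      if (c :: rest).drop 5 ≠ [] ∧ ((c :: rest).drop 5).head? ≠ some '{'
          ∧ ¬ "\\sqrt".toList.isPrefixOf ((c :: rest).drop 5) then
        "\\sqrt{".toList ++ ((c :: rest).drop 5).take 1 ++ "}".toList
          ++ pvScan (((c :: rest).drop 5).drop 1)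
      else "\\sqrt".toList ++ pvScan ((c :: rest).drop 5) := by
  rw [pvScan, if_pos hp]

theorem pv_main (n : Nat) : ∀ (l : List Char), l.length ≤ n → ∀ h t, pvS l = h :: t →
    h ++ t.flatMap pvF = pvScan l := by
  induction n with
  | zero =>
    intro l hl h t hS
    have hln : l = [] := by simpa using List.eq_nil_of_length_eq_zero (Nat.le_zero.mp hl)
    subst hln
    rw [pvS_nil] at hS
    obtain ⟨h1, h2⟩ := List.cons.inj hS
    rw [← h1, ← h2, pvScan_nil]
    simp
  | succ n ih =>
    intro l hl h t hS
    cases l with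
    | nil =>
      rw [pvS_nil] at hS
      obtain ⟨h1, h2⟩ := List.cons.inj hS
      rw [← h1, ← h2, pvScan_nil]
      simp
    | cons c rest =>
      by_cases hp : "\\sqrt".toList.isPrefixOf (c :: rest)
      · rw [pvS_prefix _ hp] at hS
        obtain ⟨hh, ht⟩ := List.cons.inj hS
        rw [pvScan_prefix c rest hp, ← hh]
        generalize hg : (c :: rest).drop 5 = r at ht ⊢
        have hrlen : r.length ≤ n := by rw [← hg]; simp at hl ⊢; omega
        by_cases hc : r ≠ [] ∧ r.head? ≠ some '{' ∧ ¬ "\\sqrt".toList.isPrefixOf r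
        · rw [if_pos hc]
          obtain ⟨hne, hbr, hnp⟩ := hc
          obtain ⟨d, r', hd⟩ := List.exists_cons_of_ne_nil hne
          have hd' : d ≠ '{' := by rw [hd] at hbr; simpa using hbr
          cases hSr : pvS r' with
          | nil => exact absurd hSr (pvS_ne_nil r')
          | cons h' t' =>
            have hSrd : pvS r = (d :: h') :: t' := by
              rw [hd, pvS_cons d r' (by rw [← hd]; exact hnp), hSr, pvApplyHead_cons]
              simp
            rw [← ht, hSrd]
            have hIH := ih r' (by rw [hd] at hrlen; simp at hrlen; omega) h' t' hSr
            rw [hd]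
            simp only [List.flatMap_cons, pvF_cons d h' hd', List.take_succ_cons,
              List.take_zero, List.drop_succ_cons, List.drop_zero, List.nil_append]
            rw [← hIH]
            simp
        · rw [if_neg hc, ← ht]
          cases hSr : pvS r with
          | nil => exact absurd hSr (pvS_ne_nil r)
          | cons h' t' =>
            have hIH := ih r hrlen h' t' hSr
            have hF : pvF h' = "\\sqrt".toList ++ h' := by
              push_neg at hc
              by_cases hre : r = []
              · rw [hre, pvS_nil] at hSr
                rw [← (List.cons.inj hSr).1, pvF_nil]
                simp
              · by_cases hpr : "\\sqrt".toList.isPrefixOf r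
                · rw [pvS_prefix _ hpr] at hSr
                  rw [← (List.cons.inj hSr).1, pvF_nil]
                  simp
                · have hbr : r.head? = some '{' := by
                    by_contra hx
                    exact hpr (hc hre hx)
                  obtain ⟨d, r', hd⟩ := List.exists_cons_of_ne_nil hre
                  have hd' : d = '{' := by rw [hd] at hbr; simpa using hbr
                  rw [hd, pvS_cons d r' (by rw [← hd]; exact hpr)] at hSr
                  cases hq : pvS r' with
                  | nil => exact absurd hq (pvS_ne_nil r')
                  | cons a b =>
                    rw [hq, pvApplyHead_cons] at hSr
                    rw [← (List.cons.inj hSr).1, hd']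
                    simp [pvF_brace]
            simp only [List.flatMap_cons, hF, List.nil_append]
            rw [← hIH]
            simp
      · rw [pvS_cons c rest hp] at hS
        cases hSr : pvS rest with
        | nil => exact absurd hSr (pvS_ne_nil rest)
        | cons h' t' =>
          rw [hSr, pvApplyHead_cons] at hS
          obtain ⟨hh, ht⟩ := List.cons.inj hS
          rw [pvScan_cons c rest hp, ← ih rest (by simp at hl; omega) h' t' hSr, ← hh, ← ht]
          simp

-- ===== VERDICT (by name: the statement is the Claim_ definition above) =====
theorem fix_sqrt_py_spec : Claim_equal_fix_sqrt_py := by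
  intro string _
  unfold Spec_fix_sqrt_py fix_sqrt_py fix_sqrt_py_alt
  by_cases hin : PySem.Str.isIn "\\sqrt" string = false
  · rw [if_pos hin, if_pos hin]
  · rw [if_neg hin, if_neg hin]
    rw [pv_splitOn_eq]
    cases hS : pvS string.toList with
    | nil => exact absurd hS (pvS_ne_nil _)
    | cons h t =>
      have hstep : (fun (ns split : List Char) =>
          if 0 < split.length ∧ PySem.List.pyGet? split 0 ≠ some '{' then
            ns ++ ("\\sqrt{".toList ++ split.take 1 ++ "}".toList ++ PySem.List.slice split (some 1) none)
          else ns ++ ("\\sqrt".toList ++ split)) = fun ns split => ns ++ pvF split := by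
        funext ns split
        simp only [pvF]
        split <;> rfl
      simp only [hS, List.headD_cons, List.drop_one, List.tail_cons, hstep,
        PySem.List.foldl_append_eq_flatMap]
      rw [pv_main (string.toList.length) string.toList le_rfl h t hS]
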